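-- pv_equiv track=rewrite | github.com/EnvyW6567/CodingTestAlgorithm | Algorithm/TwoPointer/good_number.py | solution
-- ===== SOURCE A (Python) =====
-- from collections import defaultdict
--
-- def solution(nums):
--     s_dict = defaultdict(list)
--     answer = 0
--
--     for i in range(len(nums)):
--         for j in range(i + 1, len(nums)):
--             s = nums[i] + nums[j]
--             s_dict[s].append((i, j))
--
--     for k, num in enumerate(nums):
--         if num in s_dict:
--             for i, j in s_dict[num]:
--                 if i != k and j != k:
--                     answer += 1
--     return answer
-- ===== SOURCE B (Python) =====
-- from collections import Counter
--
-- def solution(nums):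
--     # Count, for each pair (i<j), the indices k with nums[k] == nums[i]+nums[j], k != i, k != j,
--     # using a value counter instead of storing all pairs and rescanning them per k.
--     cnt = Counter(nums)
--     answer = 0
--     for j in range(len(nums)):
--         for i in range(j):
--             answer += cnt[nums[i] + nums[j]]
--             if nums[i] == 0:
--                 answer -= 1
--             if nums[j] == 0:
--                 answer -= 1
--     return answer
-- ===== Notes on version B (the rewrite author's own statement) =====
-- stated objective: faster
-- what changed: Instead of storing every index pair in a dict keyed by its sum and rescanning those pair lists for each element, B builds a Counter of the values once and, per pair (i<j), adds count(nums[i]+nums[j]) minus the two possible self-matches (nums[i]==0 or nums[j]==0).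
import Mathlib
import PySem

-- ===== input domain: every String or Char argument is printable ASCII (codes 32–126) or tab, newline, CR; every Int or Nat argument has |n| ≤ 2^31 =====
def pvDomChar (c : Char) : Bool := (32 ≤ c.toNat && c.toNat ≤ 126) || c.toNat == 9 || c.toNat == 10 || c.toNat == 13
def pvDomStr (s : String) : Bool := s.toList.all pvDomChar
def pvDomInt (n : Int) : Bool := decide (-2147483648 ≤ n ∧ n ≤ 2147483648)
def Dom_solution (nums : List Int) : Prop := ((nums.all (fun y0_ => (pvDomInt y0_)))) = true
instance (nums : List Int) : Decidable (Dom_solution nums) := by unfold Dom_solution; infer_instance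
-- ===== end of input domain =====

-- B replaces A's dict of all index pairs (rescanned per element) by a counter of the values:
-- per pair (i<j) it adds count(nums[i]+nums[j]) and subtracts the two self-matches.

-- ===== PORT A =====
-- A's first loop: build a dict sum -> list of index pairs
-- (s_dict[s].append((i,j)) on a defaultdict(list) is exactly modify with default []).
-- (nums[i] is ported as nums.getD i 0: every index the ranges produce is in bounds, so this is exact.)
def buildDict (nums : List Int) : PySem.Dict Int (List (Nat × Nat)) :=
  (List.range nums.length).foldl (fun d i =>
    (List.range' (i+1) (nums.length - (i+1))).foldl (fun d j =>
      d.modify (nums.getD i 0 + nums.getD j 0) [] (· ++ [(i, j)])) d)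
    PySem.Dict.empty

-- literal port of A: build the dict of pairs per sum, then for each position k
-- count the stored pairs with sum nums[k] avoiding index k.
def solution (nums : List Int) : Int :=
  let sDict := buildDict nums
  (List.range nums.length).foldl (fun answer k =>
      if sDict.contains (nums.getD k 0) then
        (sDict.getD (nums.getD k 0) []).foldl
          (fun answer p => if p.1 ≠ k ∧ p.2 ≠ k then answer + 1 else answer) answer
      else answer) 0

-- ===== PORT B =====
-- literal port of B: Counter of the values, then one pass over the pairs (j outer, i inner)
-- adding count(nums[i]+nums[j]) and subtracting 1 for each of the two possible self-matches.
def solution_alt (nums : List Int) : Int :=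
  let cnt : PySem.Dict Int Int :=
    nums.foldl (fun d x => d.modify x 0 (· + 1)) PySem.Dict.empty
  (List.range nums.length).foldl (fun answer j =>
    (List.range j).foldl (fun answer i =>
      let answer := answer + cnt.getD (nums.getD i 0 + nums.getD j 0) 0
      let answer := if nums.getD i 0 = 0 then answer - 1 else answer
      if nums.getD j 0 = 0 then answer - 1 else answer) answer) 0

-- ===== PRECONDITION & SPEC =====
def Spec_solution (nums : List Int) (out : Int) : Prop := out = solution_alt nums
instance (nums : List Int) (out : Int) : Decidable (Spec_solution nums out) := by unfold Spec_solution; infer_instance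

-- ===== CLAIM (what is proved, stated in full; the proofs are below) =====
def Claim_equal_solution : Prop := ∀ (nums : List Int), Dom_solution nums → Spec_solution nums (solution nums)

-- ===== LEMMAS AND PROOFS =====

-- the key/value pairs A's build loop feeds into the dict, flattened into one list
def pvKV (nums : List Int) : List (Int × (Nat × Nat)) :=
  (List.range nums.length).flatMap (fun i =>
    (List.range' (i+1) (nums.length - (i+1))).map
      (fun j => (nums.getD i 0 + nums.getD j 0, (i, j))))

lemma countP_flatMap {α β : Type} (xs : List α) (g : α → List β) (p : β → Bool) :
    (xs.flatMap g).countP p = (xs.map (fun a => (g a).countP p)).sum := by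
  simp [List.countP_eq_length_filter, List.filter_flatMap, List.length_flatMap]

-- A's dict, looked up: exactly the stored pairs whose sum is c, in build order
lemma dict_getD (nums : List Int) (c : Int) :
    (buildDict nums).getD c [] = ((pvKV nums).filter (fun q => q.1 == c)).map (·.2) := by
  have hfold : buildDict nums
      = (pvKV nums).foldl (fun d q => d.modify q.1 [] (· ++ [q.2])) PySem.Dict.empty := by
    rw [buildDict, pvKV, List.foldl_flatMap]
    simp only [List.foldl_map]
  rw [hfold, PySem.Dict.getD_foldl_modify_append, PySem.Dict.getD_empty, List.nil_append]

-- list sum over List.range as a Finset sum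
lemma sum_map_range (f : Nat → Int) (n : Nat) :
    ((List.range n).map f).sum = ∑ k ∈ Finset.range n, f k := by
  induction n with
  | zero => simp
  | succ m ih => simp [List.range_succ, Finset.sum_range_succ, ih]

-- countP over List.range as a Finset sum of indicators
lemma countP_range_int (p : Nat → Bool) (n : Nat) :
    ((List.range n).countP p : Int) = ∑ t ∈ Finset.range n, (if p t then (1:Int) else 0) := by
  induction n with
  | zero => simp
  | succ m ih =>
    simp only [List.range_succ, List.countP_append, Finset.sum_range_succ, ← ih]
    by_cases h : p m <;> simp [h]

-- countP over pvKV as a double Finset sum over the index pairs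
lemma countP_pvKV (nums : List Int) (p : Int × (Nat × Nat) → Bool) :
    (((pvKV nums).countP p : Nat) : Int)
    = ∑ i ∈ Finset.range nums.length, ∑ j ∈ Finset.Ico (i+1) nums.length,
        (if p (nums.getD i 0 + nums.getD j 0, (i, j)) then (1:Int) else 0) := by
  rw [pvKV, countP_flatMap]
  have hcast : ((((List.range nums.length).map (fun i =>
      (((List.range' (i+1) (nums.length - (i+1))).map
        (fun j => (nums.getD i 0 + nums.getD j 0, (i, j)))).countP p))).sum : Nat) : Int)
      = ((List.range nums.length).map (fun i =>
      ((((List.range' (i+1) (nums.length - (i+1))).map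
        (fun j => (nums.getD i 0 + nums.getD j 0, (i, j)))).countP p : Nat) : Int))).sum := by
    push_cast [List.map_map]; rfl
  rw [hcast, sum_map_range]
  apply Finset.sum_congr rfl
  intro i _
  rw [List.countP_map, List.range'_eq_map_range, List.countP_map, countP_range_int,
    Finset.sum_Ico_eq_sum_range]
  simp

-- the count of a value s among nums, as a sum of indicators over the indices
lemma count_as_sum (nums : List Int) (s : Int) :
    ∑ k ∈ Finset.range nums.length, (if s = nums.getD k 0 then (1:Int) else 0)
    = (nums.count s : Int) := by
  induction nums with
  | nil => simp
  | cons x xs ih =>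
    rw [List.length_cons, Finset.sum_range_succ']
    simp only [List.getD_cons_succ, List.getD_cons_zero, ih, List.count_cons]
    by_cases h : x = s
    · subst h; simp
    · have h2 : ¬ s = x := fun hh => h hh.symm
      simp [h, h2]

-- evaluating the k-sum for one fixed pair (i, j)
lemma sum_over_k (nums : List Int) (i j : Nat) (hi : i < nums.length)
    (hj : j < nums.length) (hij : i ≠ j) (s : Int) :
    ∑ k ∈ Finset.range nums.length, (if (i ≠ k ∧ j ≠ k) ∧ s = nums.getD k 0 then (1:Int) else 0)
    = (nums.count s : Int) - (if nums.getD i 0 = s then 1 else 0)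
        - (if nums.getD j 0 = s then 1 else 0) := by
  have key : ∀ k ∈ Finset.range nums.length,
      (if (i ≠ k ∧ j ≠ k) ∧ s = nums.getD k 0 then (1:Int) else 0)
      = (if s = nums.getD k 0 then 1 else 0)
        - (if k = i then (if nums.getD i 0 = s then (1:Int) else 0) else 0)
        - (if k = j then (if nums.getD j 0 = s then (1:Int) else 0) else 0) := by
    intro k _
    by_cases hki : k = i
    · have hcond : ¬ ((i ≠ k ∧ j ≠ k) ∧ s = nums.getD k 0) := by
        rintro ⟨⟨h1, _⟩, _⟩; exact h1 hki.symm
      rw [if_neg hcond, if_pos hki, if_neg (show ¬ k = j by omega), hki]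
      rcases eq_or_ne s (nums.getD i 0) with h | h
      · rw [if_pos h, if_pos h.symm]; ring
      · rw [if_neg h, if_neg (fun hh => h hh.symm)]; ring
    · by_cases hkj : k = j
      · have hcond : ¬ ((i ≠ k ∧ j ≠ k) ∧ s = nums.getD k 0) := by
          rintro ⟨⟨_, h2⟩, _⟩; exact h2 hkj.symm
        rw [if_neg hcond, if_neg hki, if_pos hkj, hkj]
        rcases eq_or_ne s (nums.getD j 0) with h | h
        · rw [if_pos h, if_pos h.symm]; ring
        · rw [if_neg h, if_neg (fun hh => h hh.symm)]; ring
      · rw [if_neg hki, if_neg hkj]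
        by_cases h : s = nums.getD k 0
        · rw [if_pos ⟨⟨Ne.symm hki, Ne.symm hkj⟩, h⟩, if_pos h]; ring
        · rw [if_neg (by tauto), if_neg h]; ring
  rw [Finset.sum_congr rfl key, Finset.sum_sub_distrib, Finset.sum_sub_distrib, count_as_sum,
    Finset.sum_ite_eq' (Finset.range nums.length) i
      (fun _ => if nums.getD i 0 = s then (1:Int) else 0),
    Finset.sum_ite_eq' (Finset.range nums.length) j
      (fun _ => if nums.getD j 0 = s then (1:Int) else 0)]
  simp [Finset.mem_range.mpr hi, Finset.mem_range.mpr hj]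

-- the triangle swap: the sum over pairs i < j < n grouped by i equals the same grouped by j
lemma triangle_swap (g : Nat → Nat → Int) (n : Nat) :
    ∑ i ∈ Finset.range n, ∑ j ∈ Finset.Ico (i+1) n, g i j
    = ∑ j ∈ Finset.range n, ∑ i ∈ Finset.range j, g i j := by
  induction n with
  | zero => simp
  | succ m ih =>
    rw [Finset.sum_range_succ, Finset.sum_range_succ]
    have h1 : ∀ i ∈ Finset.range m, ∑ j ∈ Finset.Ico (i+1) (m+1), g i j
        = (∑ j ∈ Finset.Ico (i+1) m, g i j) + g i m := by
      intro i hi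
      exact Finset.sum_Ico_succ_top (Finset.mem_range.mp hi) _
    rw [Finset.sum_congr rfl h1, Finset.sum_add_distrib, ih]
    simp

-- A as a triple Finset sum of indicators
lemma solution_as_sum (nums : List Int) :
    solution nums
    = ∑ k ∈ Finset.range nums.length, ∑ i ∈ Finset.range nums.length,
        ∑ j ∈ Finset.Ico (i+1) nums.length,
        (if (i ≠ k ∧ j ≠ k) ∧ nums.getD i 0 + nums.getD j 0 = nums.getD k 0
         then (1:Int) else 0) := by
  simp only [solution]
  have hstep : (fun (answer : Int) k =>
      if (buildDict nums).contains (nums.getD k 0) then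
        ((buildDict nums).getD (nums.getD k 0) []).foldl
          (fun answer p => if p.1 ≠ k ∧ p.2 ≠ k then answer + 1 else answer) answer
      else answer)
      = fun answer k => answer +
          (((((pvKV nums).filter (fun q => q.1 == nums.getD k 0)).map (·.2)).countP
            (fun p => decide (p.1 ≠ k ∧ p.2 ≠ k)) : Nat) : Int) := by
    funext answer k
    by_cases hc : (buildDict nums).contains (nums.getD k 0)
    · rw [if_pos hc, PySem.List.foldl_ite_add_one, dict_getD]
    · rw [if_neg hc]
      have hcf : (buildDict nums).contains (nums.getD k 0) = false := by
        simp only [Bool.not_eq_true] at hc; exact hc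
      have hnil : ((pvKV nums).filter (fun q => q.1 == nums.getD k 0)).map (·.2) = [] :=
        (dict_getD nums (nums.getD k 0)).symm.trans
          (PySem.Dict.getD_of_not_contains _ _ hcf)
      rw [hnil]
      simp
  rw [hstep, PySem.List.foldl_add, sum_map_range, zero_add]
  apply Finset.sum_congr rfl
  intro k _
  rw [List.countP_map, List.countP_filter, countP_pvKV]
  apply Finset.sum_congr rfl
  intro i _
  apply Finset.sum_congr rfl
  intro j _
  simp only [Function.comp, Bool.and_eq_true, decide_eq_true_eq, beq_iff_eq]

-- B as a double Finset sum
lemma solution_alt_as_sum (nums : List Int) :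
    solution_alt nums
    = ∑ j ∈ Finset.range nums.length, ∑ i ∈ Finset.range j,
        ((nums.count (nums.getD i 0 + nums.getD j 0) : Int)
          - (if nums.getD i 0 = 0 then 1 else 0)
          - (if nums.getD j 0 = 0 then 1 else 0)) := by
  simp only [solution_alt]
  rw [← PySem.Dict.counter_eq_foldl]
  have hinner : ∀ (j : Nat),
      (fun (answer : Int) i =>
        if nums.getD j 0 = 0 then
          (if nums.getD i 0 = 0 then
            answer + (PySem.Dict.counter nums).getD (nums.getD i 0 + nums.getD j 0) 0 - 1
          else answer + (PySem.Dict.counter nums).getD (nums.getD i 0 + nums.getD j 0) 0) - 1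
        else
          (if nums.getD i 0 = 0 then
            answer + (PySem.Dict.counter nums).getD (nums.getD i 0 + nums.getD j 0) 0 - 1
          else answer + (PySem.Dict.counter nums).getD (nums.getD i 0 + nums.getD j 0) 0))
      = fun answer i => answer +
          ((nums.count (nums.getD i 0 + nums.getD j 0) : Int)
            - (if nums.getD i 0 = 0 then 1 else 0)
            - (if nums.getD j 0 = 0 then 1 else 0)) := by
    intro j
    funext answer i
    rw [PySem.Dict.getD_counter]
    split_ifs <;> ring
  have houter : (fun (answer : Int) j =>
      (List.range j).foldl
        (fun (answer : Int) i =>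
          if nums.getD j 0 = 0 then
            (if nums.getD i 0 = 0 then
              answer + (PySem.Dict.counter nums).getD (nums.getD i 0 + nums.getD j 0) 0 - 1
            else answer + (PySem.Dict.counter nums).getD (nums.getD i 0 + nums.getD j 0) 0) - 1
          else
            (if nums.getD i 0 = 0 then
              answer + (PySem.Dict.counter nums).getD (nums.getD i 0 + nums.getD j 0) 0 - 1
            else answer + (PySem.Dict.counter nums).getD (nums.getD i 0 + nums.getD j 0) 0))
        answer)
      = fun answer j => answer + ∑ i ∈ Finset.range j,
          ((nums.count (nums.getD i 0 + nums.getD j 0) : Int)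
            - (if nums.getD i 0 = 0 then 1 else 0)
            - (if nums.getD j 0 = 0 then 1 else 0)) := by
    funext answer j
    rw [hinner j, PySem.List.foldl_add, sum_map_range]
  rw [houter, PySem.List.foldl_add, sum_map_range, zero_add]

-- ===== VERDICT (by name: the statement is the Claim_ definition above) =====
theorem solution_spec : Claim_equal_solution := by
  intro nums _
  show solution nums = solution_alt nums
  rw [solution_as_sum, solution_alt_as_sum, ← triangle_swap, Finset.sum_comm]
  apply Finset.sum_congr rfl
  intro i hi
  rw [Finset.sum_comm]
  apply Finset.sum_congr rfl
  intro j hj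
  obtain ⟨hj1, hj2⟩ := Finset.mem_Ico.mp hj
  have hij : i ≠ j := by omega
  rw [sum_over_k nums i j (Finset.mem_range.mp hi) hj2 hij
    (nums.getD i 0 + nums.getD j 0)]
  have e1 : (if nums.getD i 0 = nums.getD i 0 + nums.getD j 0 then (1:Int) else 0)
      = if nums.getD j 0 = 0 then 1 else 0 := if_congr (by omega) rfl rfl
  have e2 : (if nums.getD j 0 = nums.getD i 0 + nums.getD j 0 then (1:Int) else 0)
      = if nums.getD i 0 = 0 then 1 else 0 := if_congr (by omega) rfl rfl
  rw [e1, e2]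
  ring
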